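-- pv_equiv track=rewrite | github.com/pikachu-pika/pythonProjectExerxice | sum_of_series.py | series20
-- ===== SOURCE A (Python) =====
-- def series20(n):
--     su = 0
--     c = 1
--     for i in range(2, n + 1, 2):
--         if c % 2 != 0:
--             su += i
--         else:
--             su -= i
--         c += 1
--     return su
-- ===== SOURCE B (Python) =====
-- def series20(n):
--     # closed form: the loop adds 2 - 4 + 6 - ... over m = n//2 terms
--     m = max(0, n // 2)
--     return m + 1 if m % 2 != 0 else -m
-- ===== Notes on version B (the rewrite author's own statement) =====
-- stated objective: faster
-- what changed: Replaces the O(n) alternating-sign loop over even numbers with an O(1) closed-form formula on m = n//2 terms (consecutive terms pair to -2).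
import Mathlib
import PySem

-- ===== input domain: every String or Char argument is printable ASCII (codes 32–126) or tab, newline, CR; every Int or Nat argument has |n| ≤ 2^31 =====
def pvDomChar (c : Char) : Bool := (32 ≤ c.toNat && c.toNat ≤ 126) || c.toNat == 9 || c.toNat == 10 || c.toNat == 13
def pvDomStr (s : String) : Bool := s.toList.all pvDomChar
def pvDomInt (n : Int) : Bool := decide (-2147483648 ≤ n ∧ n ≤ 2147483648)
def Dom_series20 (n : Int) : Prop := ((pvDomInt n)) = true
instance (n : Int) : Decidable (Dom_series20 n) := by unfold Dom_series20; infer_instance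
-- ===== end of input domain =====

-- B replaces A's O(n) alternating loop over the evens by an O(1) closed-form formula on m = n//2.

-- ===== PORT A =====
-- for i in range(2, n+1, 2): if c % 2 != 0: su += i else: su -= i; c += 1
def series20 (n : Int) : Int :=
  ((PySem.List.pyRange 2 (n + 1) 2).foldl
    (fun (st : Int × Int) i =>
      (if PySem.Int.mod st.2 2 ≠ 0 then st.1 + i else st.1 - i, st.2 + 1))
    (0, 1)).1

-- ===== PORT B =====
-- m = max(0, n // 2); return m + 1 if m % 2 != 0 else -m
def series20_alt (n : Int) : Int :=
  let m := max 0 (PySem.Int.floordiv n 2)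
  if PySem.Int.mod m 2 ≠ 0 then m + 1 else -m

-- ===== PRECONDITION & SPEC =====
def Spec_series20 (n : Int) (out : Int) : Prop := out = series20_alt n
instance (n : Int) (out : Int) : Decidable (Spec_series20 n out) := by unfold Spec_series20; infer_instance

-- ===== CLAIM (what is proved, stated in full; the proofs are below) =====
def Claim_equal_series20 : Prop := ∀ (n : Int), Dom_series20 n → Spec_series20 n (series20 n)

-- ===== LEMMAS AND PROOFS =====

-- loop invariant: after m terms the state is (alternating sum, m+1)
lemma series20_loop (m : Nat) :
    ((List.range m).map (fun k : Nat => (2 : Int) + 2 * (k : Int))).foldl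
      (fun (st : Int × Int) i =>
        (if PySem.Int.mod st.2 2 ≠ 0 then st.1 + i else st.1 - i, st.2 + 1))
      (0, 1)
    = (if m % 2 = 0 then -(m : Int) else (m : Int) + 1, (m : Int) + 1) := by
  induction m with
  | zero => simp
  | succ m ih =>
    rw [List.range_succ, List.map_append, List.foldl_append, ih]
    simp only [List.map_cons, List.map_nil, List.foldl_cons, List.foldl_nil]
    rcases Nat.even_or_odd m with he | ho
    · obtain ⟨k, hk⟩ := he
      have h2 : ((m : Int) + 1) % 2 = 1 := by omega
      simp [hk]
      split_ifs <;> omega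
    · obtain ⟨k, hk⟩ := ho
      have h2 : ((m : Int) + 1) % 2 = 0 := by omega
      simp [hk]
      split_ifs <;> omega

lemma series20_eq (n : Int) : series20 n = series20_alt n := by
  have halt : series20_alt n =
      (if PySem.Int.mod (max 0 (PySem.Int.floordiv n 2)) 2 ≠ 0
        then max 0 (PySem.Int.floordiv n 2) + 1
        else -(max 0 (PySem.Int.floordiv n 2))) := rfl
  have hfd : PySem.Int.floordiv n 2 = n / 2 :=
    PySem.Int.floordiv_eq_ediv_of_pos (by norm_num)
  unfold series20
  rw [PySem.List.pyRange_of_pos 2 (n + 1) (by norm_num), halt, hfd]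
  by_cases h : (2 : Int) < n + 1
  · rw [if_pos h, show (n + 1 - 2 + 2 - 1) / 2 = n / 2 by omega, series20_loop]
    have hm : max 0 (n / 2) = n / 2 := by omega
    have hcast : (((n / 2).toNat : Int)) = n / 2 := by omega
    have hmod : PySem.Int.mod (n / 2) 2 = (n / 2) % 2 :=
      PySem.Int.mod_eq_emod_of_pos (by norm_num)
    rw [hm, hmod]
    by_cases hp : (n / 2).toNat % 2 = 0
    · have h2 : (n / 2) % 2 = 0 := by omega
      simp [hp, h2, hcast]
    · have h2 : (n / 2) % 2 = 1 := by omega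
      simp [hp, h2, hcast]
  · have hm : max 0 (n / 2) = 0 := by omega
    rw [if_neg h, hm]
    simp [PySem.Int.mod]

-- ===== VERDICT (by name: the statement is the Claim_ definition above) =====
theorem series20_spec : Claim_equal_series20 := by
  intro n _
  exact series20_eq n
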